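-- pv_equiv track=rewrite | github.com/weilalicia7/datamonitor | monitoring/event_aggregator.py | _get_affected_sites
-- ===== SOURCE A (Python) =====
-- from typing import Dict, List, Optional, Any, Set
--
-- def _get_affected_sites(postcodes: List[str]) -> List[str]:
--     """Determine which sites are affected by postcodes"""
--     # Simple mapping - in production would use geographic analysis
--     site_postcode_map = {
--         'WC': ['CF10', 'CF11', 'CF14', 'CF15', 'CF23', 'CF24', 'CF3', 'CF5'],
--         'NP': ['NP10', 'NP19', 'NP20', 'NP44'],
--         'SW': ['SA1', 'SA2', 'SA3', 'SA4']
--     }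
--
--     affected_sites = []
--     for site, site_postcodes in site_postcode_map.items():
--         if any(pc in postcodes for pc in site_postcodes):
--             affected_sites.append(site)
--
--     return affected_sites
-- ===== SOURCE B (Python) =====
-- def _get_affected_sites(postcodes):
--     """Determine which sites are affected by postcodes"""
--     site_postcode_map = {
--         'WC': ['CF10', 'CF11', 'CF14', 'CF15', 'CF23', 'CF24', 'CF3', 'CF5'],
--         'NP': ['NP10', 'NP19', 'NP20', 'NP44'],
--         'SW': ['SA1', 'SA2', 'SA3', 'SA4']
--     }
--     # reverse lookup: postcode -> site, built once
--     reverse = {pc: site for site, pcs in site_postcode_map.items() for pc in pcs}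
--     affected = set()
--     for pc in postcodes:
--         site = reverse.get(pc)
--         if site is not None:
--             affected.add(site)
--     return [site for site in site_postcode_map if site in affected]
-- ===== Notes on version B (the rewrite author's own statement) =====
-- stated objective: alternative
-- what changed: Replaces the per-site membership scans of the input (for each site, test each of its postcodes against the whole input list) with a reverse postcode-to-site dict built once, a single pass over the input collecting affected sites into a set, and a final filter of the site keys preserving A's key order and dedup.
import Mathlib
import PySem

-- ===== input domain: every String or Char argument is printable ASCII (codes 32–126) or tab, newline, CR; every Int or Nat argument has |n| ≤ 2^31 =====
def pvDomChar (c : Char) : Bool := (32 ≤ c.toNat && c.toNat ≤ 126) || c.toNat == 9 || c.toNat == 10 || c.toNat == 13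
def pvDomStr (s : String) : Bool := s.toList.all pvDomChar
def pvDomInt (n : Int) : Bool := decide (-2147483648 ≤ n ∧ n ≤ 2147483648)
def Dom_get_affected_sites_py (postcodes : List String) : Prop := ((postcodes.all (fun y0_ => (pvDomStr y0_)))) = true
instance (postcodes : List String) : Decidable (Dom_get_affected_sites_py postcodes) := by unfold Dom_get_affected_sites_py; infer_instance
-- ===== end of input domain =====

-- B replaces A's per-site scans of the whole input with a reverse postcode→site dict,
-- one pass over the input collecting affected sites into a set, and a filter of the
-- site keys (objective: alternative decomposition; same return value).


-- ===== PORT A =====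
-- A's dict literal site_postcode_map, as an insertion-ordered association list
def siteMapA : List (String × List String) :=
  [("WC", ["CF10", "CF11", "CF14", "CF15", "CF23", "CF24", "CF3", "CF5"]),
   ("NP", ["NP10", "NP19", "NP20", "NP44"]),
   ("SW", ["SA1", "SA2", "SA3", "SA4"])]

-- loop over site_postcode_map.items(): append site if any of its postcodes is in the input
def get_affected_sites_py (postcodes : List String) : List String :=
  siteMapA.foldl
    (fun affected_sites p =>
      if p.2.any (fun pc => postcodes.contains pc) then affected_sites ++ [p.1]
      else affected_sites)
    []

-- ===== PORT B =====
def siteMapB : List (String × List String) :=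
  [("WC", ["CF10", "CF11", "CF14", "CF15", "CF23", "CF24", "CF3", "CF5"]),
   ("NP", ["NP10", "NP19", "NP20", "NP44"]),
   ("SW", ["SA1", "SA2", "SA3", "SA4"])]

-- reverse = {pc: site for site, pcs in site_postcode_map.items() for pc in pcs}
def revMapB : PySem.Dict String String :=
  PySem.Dict.ofList (siteMapB.flatMap (fun p => p.2.map (fun pc => (pc, p.1))))

-- for pc in postcodes: site = reverse.get(pc); if site is not None: affected.add(site)
def affectedOfB (postcodes : List String) : PySem.Set String :=
  postcodes.foldl
    (fun affected pc =>
      match revMapB.get? pc with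
      | some site => PySem.Set.add affected site
      | none => affected)
    PySem.Set.empty

-- [site for site in site_postcode_map if site in affected]
def get_affected_sites_py_alt (postcodes : List String) : List String :=
  (siteMapB.map Prod.fst).filter (fun site => PySem.Set.contains (affectedOfB postcodes) site)

-- ===== PRECONDITION & SPEC =====
def Spec_get_affected_sites_py (postcodes : List String) (out : List String) : Prop := out = get_affected_sites_py_alt postcodes
instance (postcodes : List String) (out : List String) : Decidable (Spec_get_affected_sites_py postcodes out) := by unfold Spec_get_affected_sites_py; infer_instance

-- ===== CLAIM (what is proved, stated in full; the proofs are below) =====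
def Claim_equal_get_affected_sites_py : Prop := ∀ (postcodes : List String), Dom_get_affected_sites_py postcodes → Spec_get_affected_sites_py postcodes (get_affected_sites_py postcodes)

-- ===== LEMMAS AND PROOFS =====

-- the reverse dict, evaluated (its 16 keys are distinct, so ofList keeps them all in order)
theorem revMapB_eq : revMapB =
    { items := [("CF10", "WC"), ("CF11", "WC"), ("CF14", "WC"), ("CF15", "WC"), ("CF23", "WC"),
                ("CF24", "WC"), ("CF3", "WC"), ("CF5", "WC"), ("NP10", "NP"), ("NP19", "NP"),
                ("NP20", "NP"), ("NP44", "NP"), ("SA1", "SW"), ("SA2", "SW"), ("SA3", "SW"),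
                ("SA4", "SW")] } := by decide

-- membership in the accumulated set of B's loop
theorem mem_affected_fold (ps : List String) (init : PySem.Set String) (y : String) :
    y ∈ ps.foldl
      (fun affected pc =>
        match revMapB.get? pc with
        | some site => PySem.Set.add affected site
        | none => affected)
      init ↔ y ∈ init ∨ ∃ pc ∈ ps, revMapB.get? pc = some y := by
  induction ps generalizing init with
  | nil => simp
  | cons p ps ih =>
    simp only [List.foldl_cons, ih, List.mem_cons]
    cases h : revMapB.get? p with
    | none => constructor
              · rintro (hy | ⟨pc, hpc, hg⟩)
                · exact Or.inl hy
                · exact Or.inr ⟨pc, Or.inr hpc, hg⟩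
              · rintro (hy | ⟨pc, (rfl | hpc), hg⟩)
                · exact Or.inl hy
                · rw [h] at hg; cases hg
                · exact Or.inr ⟨pc, hpc, hg⟩
    | some site =>
      simp only [PySem.Set.mem_add]
      constructor
      · rintro ((hy | rfl) | ⟨pc, hpc, hg⟩)
        · exact Or.inl hy
        · exact Or.inr ⟨p, Or.inl rfl, h⟩
        · exact Or.inr ⟨pc, Or.inr hpc, hg⟩
      · rintro (hy | ⟨pc, (rfl | hpc), hg⟩)
        · exact Or.inl (Or.inl hy)
        · rw [h] at hg; exact Or.inl (Or.inr (Option.some_inj.mp hg).symm)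
        · exact Or.inr ⟨pc, hpc, hg⟩

-- which reverse lookups yield each site code
theorem revGet_WC (pc : String) : revMapB.get? pc = some "WC" ↔
    pc ∈ (["CF10", "CF11", "CF14", "CF15", "CF23", "CF24", "CF3", "CF5"] : List String) := by
  rw [revMapB_eq, PySem.Dict.get?_eq_some_iff_mem_items _ pc "WC" (by decide)]
  simp

theorem revGet_NP (pc : String) : revMapB.get? pc = some "NP" ↔
    pc ∈ (["NP10", "NP19", "NP20", "NP44"] : List String) := by
  rw [revMapB_eq, PySem.Dict.get?_eq_some_iff_mem_items _ pc "NP" (by decide)]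
  simp

theorem revGet_SW (pc : String) : revMapB.get? pc = some "SW" ↔
    pc ∈ (["SA1", "SA2", "SA3", "SA4"] : List String) := by
  rw [revMapB_eq, PySem.Dict.get?_eq_some_iff_mem_items _ pc "SW" (by decide)]
  simp

-- B's set test for a site = A's any-scan condition for that site
theorem contains_affected (postcodes : List String) (site : String)
    (pcs : List String) (h : ∀ pc, revMapB.get? pc = some site ↔ pc ∈ pcs) :
    PySem.Set.contains (affectedOfB postcodes) site
      = pcs.any (fun pc => postcodes.contains pc) := by
  rw [Bool.eq_iff_iff]
  simp only [PySem.Set.contains_eq_listContains, List.contains_iff_mem, affectedOfB,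
    mem_affected_fold, List.any_eq_true]
  simp only [h, PySem.Set.empty]
  constructor
  · rintro (hy | ⟨pc, hpc, hm⟩)
    · simp at hy
    · exact ⟨pc, hm, by simpa using hpc⟩
  · rintro ⟨pc, hm, hpc⟩
    exact Or.inr ⟨pc, by simpa using hpc, hm⟩

-- ===== VERDICT (by name: the statement is the Claim_ definition above) =====
theorem get_affected_sites_py_spec : Claim_equal_get_affected_sites_py := by
  intro postcodes _
  unfold Spec_get_affected_sites_py
  have hWC := contains_affected postcodes "WC" _ revGet_WC
  have hNP := contains_affected postcodes "NP" _ revGet_NP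
  have hSW := contains_affected postcodes "SW" _ revGet_SW
  simp only [get_affected_sites_py, get_affected_sites_py_alt, siteMapA, siteMapB,
    List.foldl_cons, List.foldl_nil, List.map_cons, List.map_nil, List.filter_cons,
    List.filter_nil, hWC, hNP, hSW]
  split_ifs <;> simp_all
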